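-- pv_equiv track=rewrite | github.com/AnniXiong/nuclear_data_analysis | N_data.py | denominator
-- ===== SOURCE A (Python) =====
-- def denominator (count_list):
--
--     length = len(count_list)
--     nonzero_indeces = (length-idx for idx, item in enumerate(reversed(count_list), 0) if item != 0 and idx > 0)
--     last_non_zero_index = next(nonzero_indeces, -1)
--
--     max_count = max(count_list)
--     max_indeces = (length-i for i, j in enumerate(reversed(count_list), 0) if j == max_count)
--     channel = next(max_indeces, -2) # channel number with the largest count
--
--     dem = (max_count-1) * last_non_zero_index + channel
--     return dem
-- ===== SOURCE B (Python) =====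
-- def denominator(count_list):
--     max_count = max(count_list)
--     length = len(count_list)
--     last_non_zero_index = -1
--     channel = -2
--     for p, v in enumerate(count_list):
--         if v != 0 and p < length - 1:
--             last_non_zero_index = p + 1
--         if v == max_count:
--             channel = p + 1
--     return (max_count - 1) * last_non_zero_index + channel
-- ===== Notes on version B (the rewrite author's own statement) =====
-- stated objective: alternative
-- what changed: Replaces the two reversed early-stopping generator expressions (each scanning from the end for the first match) by a single forward pass over enumerate(count_list) that keeps the last qualifying index for both quantities.
-- outside the precondition, e.g. on denominator([]): A raises ValueError, B raises ValueError
import Mathlib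
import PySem

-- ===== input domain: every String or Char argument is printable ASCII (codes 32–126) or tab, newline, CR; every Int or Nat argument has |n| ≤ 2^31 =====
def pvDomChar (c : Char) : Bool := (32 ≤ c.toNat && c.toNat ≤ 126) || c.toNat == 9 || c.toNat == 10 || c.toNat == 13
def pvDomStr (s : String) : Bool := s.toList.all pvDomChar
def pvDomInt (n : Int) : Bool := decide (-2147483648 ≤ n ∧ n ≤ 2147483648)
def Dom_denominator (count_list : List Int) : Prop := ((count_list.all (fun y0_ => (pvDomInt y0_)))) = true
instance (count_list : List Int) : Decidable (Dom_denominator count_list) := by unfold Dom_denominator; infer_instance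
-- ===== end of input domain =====

-- B replaces A's two reversed early-stopping scans by one forward pass keeping the last qualifying index (alternative decomposition, same cost).


-- ===== PORT A =====
-- literal port: the two generators over enumerate(reversed(count_list)) become
-- find? over PySem.List.enumerate of the reversed list; next(g, default) is the match.
def denominator (count_list : List Int) : Int :=
  let length : Int := count_list.length
  let last_non_zero_index : Int :=
    match (PySem.List.enumerate count_list.reverse 0).find?
        (fun p => (p.2 != 0) && (decide (0 < p.1))) with
    | some p => length - p.1
    | none => -1
  match PySem.List.max? count_list (fun y => y) with
  | none => 0   -- Python raises ValueError on max([]); excluded by Pre_denominator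
  | some max_count =>
    let channel : Int :=
      match (PySem.List.enumerate count_list.reverse 0).find?
          (fun p => p.2 == max_count) with
      | some p => length - p.1
      | none => -2
    (max_count - 1) * last_non_zero_index + channel

-- ===== PORT B =====
-- literal port of Source B: one forward foldl over enumerate(count_list) carrying both indices.
def denominator_alt (count_list : List Int) : Int :=
  match PySem.List.max? count_list (fun y => y) with
  | none => 0   -- Python raises ValueError on max([]); excluded by Pre_denominator
  | some max_count =>
    let length : Int := count_list.length
    let st : Int × Int :=
      (PySem.List.enumerate count_list 0).foldl
        (fun (st : Int × Int) p =>
          (if (p.2 != 0) && (decide (p.1 < length - 1)) then p.1 + 1 else st.1,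
           if p.2 == max_count then p.1 + 1 else st.2))
        (-1, -2)
    (max_count - 1) * st.1 + st.2

-- ===== PRECONDITION & SPEC =====
-- Pre_ excludes only the empty list, on which Python's max([]) raises ValueError.
def Pre_denominator (count_list : List Int) : Prop := count_list ≠ []
instance (count_list : List Int) : Decidable (Pre_denominator count_list) := by unfold Pre_denominator; infer_instance
def pvWitness_denominator : List Int := [0, 3, 1, 0]

def Spec_denominator (count_list : List Int) (out : Int) : Prop := out = denominator_alt count_list
instance (count_list : List Int) (out : Int) : Decidable (Spec_denominator count_list out) := by unfold Spec_denominator; infer_instance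

-- ===== CLAIM (what is proved, stated in full; the proofs are below) =====
def Claim_equal_denominator : Prop := ∀ (count_list : List Int), Dom_denominator count_list → Pre_denominator count_list → Spec_denominator count_list (denominator count_list)

-- ===== LEMMAS AND PROOFS =====

lemma pv_find?_congr {α : Type} (l : List α) (f g : α → Bool)
    (h : ∀ x ∈ l, f x = g x) : l.find? f = l.find? g := by
  induction l with
  | nil => rfl
  | cons a t ih =>
    simp only [List.find?]
    rw [h a (by simp)]
    cases g a
    · exact ih (fun x hx => h x (by simp [hx]))
    · rfl

lemma pv_foldl_prod {α : Type} (l : List α) (f g : Int → α → Int) (a b : Int) :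
    l.foldl (fun st p => (f st.1 p, g st.2 p)) (a, b) = (l.foldl f a, l.foldl g b) := by
  induction l generalizing a b with
  | nil => rfl
  | cons x t ih => simpa using ih (f a x) (g b x)

lemma pv_foldl_congr {α : Type} (l : List α) (f g : Int → α → Int) (a : Int)
    (h : ∀ x ∈ l, ∀ acc, f acc x = g acc x) : l.foldl f a = l.foldl g a := by
  induction l generalizing a with
  | nil => rfl
  | cons x t ih =>
    simp only [List.foldl]
    rw [h x (by simp)]
    exact ih _ (fun y hy acc => h y (by simp [hy]) acc)

-- first match on the reversed enumeration = last match on the forward enumeration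
lemma pv_find_rev_eq_foldl (q : Int → Bool) (d : Int) (l : List Int) (s : Int) :
    (match (PySem.List.enumerate l.reverse s).find? (fun p => q p.2) with
     | some p => s + (l.length : Int) - p.1
     | none => d)
    = (PySem.List.enumerate l 0).foldl (fun acc p => if q p.2 then p.1 + 1 else acc) d := by
  induction l using List.reverseRecOn generalizing s d with
  | nil => simp [PySem.List.enumerate_nil]
  | append_singleton ys x ih =>
    rw [List.reverse_append]
    simp only [List.reverse_cons, List.reverse_nil, List.nil_append, List.cons_append,
      PySem.List.enumerate_cons, List.find?_cons,
      PySem.List.enumerate_append, PySem.List.enumerate_nil, List.foldl_append,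
      List.length_append, List.length_cons, List.length_nil]
    cases hq : q x with
    | true =>
      simp only [List.foldl, hq, if_true]
      push_cast; ring
    | false =>
      simp only [List.foldl, hq]
      have := ih d (s + 1)
      cases hf : (PySem.List.enumerate ys.reverse (s + 1)).find? (fun p => q p.2) with
      | none => rw [hf] at this; simpa using this
      | some p =>
        rw [hf] at this
        simp only [hf] at *
        simp only [← this]
        push_cast; ring

lemma pv_mem_enumerate_fst {l : List Int} {s : Int} {p : Int × Int}
    (h : p ∈ PySem.List.enumerate l s) : s ≤ p.1 ∧ p.1 < s + l.length := by
  obtain ⟨k, hk, rfl⟩ := (PySem.List.mem_enumerate_iff _ _ _).mp h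
  constructor <;> simp <;> omega

-- ===== VERDICT (by name: the statement is the Claim_ definition above) =====
theorem denominator_spec : Claim_equal_denominator := by
  intro cl _ hpre
  rcases List.eq_nil_or_concat cl with h | ⟨ys, x, h⟩
  · exact absurd h hpre
  subst h
  simp only [List.concat_eq_append] at hpre ⊢
  unfold Spec_denominator denominator denominator_alt
  cases hm : PySem.List.max? (ys ++ [x]) (fun y => y) with
  | none => exact absurd ((PySem.List.max?_eq_none_iff _ _).mp hm) (by simp)
  | some m =>
    simp only [hm]
    rw [pv_foldl_prod (PySem.List.enumerate (ys ++ [x]))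
      (fun a p => if (p.2 != 0) && (decide (p.1 < (((ys ++ [x]).length : Nat) : Int) - 1)) then p.1 + 1 else a)
      (fun a p => if p.2 == m then p.1 + 1 else a) (-1) (-2)]
    have hA : (match (PySem.List.enumerate (ys ++ [x]).reverse 0).find?
          (fun p => (p.2 != 0) && (decide (0 < p.1))) with
        | some p => (((ys ++ [x]).length : Nat) : Int) - p.1
        | none => -1)
        = (PySem.List.enumerate ys 0).foldl
            (fun acc p => if p.2 != 0 then p.1 + 1 else acc) (-1) := by
      rw [show (ys ++ [x]).reverse = x :: ys.reverse by simp]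
      rw [PySem.List.enumerate_cons, List.find?_cons_of_neg (by simp)]
      have hcong : (PySem.List.enumerate ys.reverse (0 + 1)).find?
            (fun p => (p.2 != 0) && (decide (0 < p.1)))
          = (PySem.List.enumerate ys.reverse (0 + 1)).find? (fun p => p.2 != 0) := by
        apply pv_find?_congr
        intro p hp
        have hmem := pv_mem_enumerate_fst hp
        have hd : decide (0 < p.1) = true := by simp only [decide_eq_true_eq]; omega
        simp [hd]
      rw [hcong]
      have hkey := pv_find_rev_eq_foldl (fun v => v != 0) (-1) ys (0 + 1)
      rw [← hkey]
      cases hf : (PySem.List.enumerate ys.reverse (0 + 1)).find? (fun p => p.2 != 0) with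
      | none => simp
      | some p => simp only [List.length_append, List.length_singleton]; push_cast; ring
    have hB : (PySem.List.enumerate (ys ++ [x]) 0).foldl
          (fun acc p => if (p.2 != 0) &&
              (decide (p.1 < (((ys ++ [x]).length : Nat) : Int) - 1)) then p.1 + 1 else acc) (-1)
        = (PySem.List.enumerate ys 0).foldl
            (fun acc p => if p.2 != 0 then p.1 + 1 else acc) (-1) := by
      rw [PySem.List.enumerate_append, List.foldl_append]
      simp only [PySem.List.enumerate_cons, PySem.List.enumerate_nil, List.foldl]
      rw [if_neg (by simp)]
      apply pv_foldl_congr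
      intro p hp acc
      have hmem := pv_mem_enumerate_fst hp
      have hlt : p.1 < ((ys.length : Nat) : Int) := by omega
      by_cases h0 : p.2 = 0 <;> simp [h0, hlt]
    have hC := pv_find_rev_eq_foldl (fun v => v == m) (-2) (ys ++ [x]) 0
    simp only [zero_add] at hC
    rw [hA, hB, hC]
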